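-- pv_equiv track=rewrite | github.com/PrimarisEquilibrium/LeetCode-Progress | CodeWars/5kyu/Alpha.py | alphanumeric
-- ===== SOURCE A (Python) =====
-- import string
--
-- def alphanumeric(password):
--     if password == "":
--         return False
--     else:
--         valid = f"{string.ascii_letters}{string.digits}"
--         for i in password:
--             if i not in valid:
--                 return False
--         return True
-- ===== SOURCE B (Python) =====
-- def alphanumeric(password):
--     return password.isalnum()
-- ===== Notes on version B (the rewrite author's own statement) =====
-- stated objective: idiomatic
-- what changed: Replaces the empty-string guard plus explicit per-character membership loop over a hand-built 62-character valid string with a single str.isalnum() call, which on the ASCII domain decides non-empty-and-all-alphanumeric in one builtin pass.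
import Mathlib
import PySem

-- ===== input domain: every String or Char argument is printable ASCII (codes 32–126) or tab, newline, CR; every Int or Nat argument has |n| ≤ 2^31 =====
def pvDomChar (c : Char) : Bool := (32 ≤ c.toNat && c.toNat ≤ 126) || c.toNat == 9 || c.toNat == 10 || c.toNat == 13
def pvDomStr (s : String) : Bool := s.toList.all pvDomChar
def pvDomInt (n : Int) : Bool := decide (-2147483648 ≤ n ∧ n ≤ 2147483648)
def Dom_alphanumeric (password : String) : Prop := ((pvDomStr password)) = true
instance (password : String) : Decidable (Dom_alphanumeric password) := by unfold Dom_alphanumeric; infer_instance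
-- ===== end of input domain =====

-- B replaces A's empty-string guard and per-character membership loop over a hand-built
-- valid-character string with a single idiomatic str.isalnum() call.


-- ===== PORT A =====
-- valid = string.ascii_letters + string.digits, as its list of characters
def pvValid : List Char := ['a','b','c','d','e','f','g','h','i','j','k','l','m','n','o','p','q','r','s','t','u','v','w','x','y','z','A','B','C','D','E','F','G','H','I','J','K','L','M','N','O','P','Q','R','S','T','U','V','W','X','Y','Z','0','1','2','3','4','5','6','7','8','9']

-- the 'for i in password: if i not in valid: return False' loop (early return on a bad char)
def pvAlphaLoop : List Char → Bool
  | [] => true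
  | c :: rest => if pvValid.contains c = false then false else pvAlphaLoop rest

def alphanumeric (password : String) : Bool :=
  if password == "" then false else pvAlphaLoop password.toList

-- ===== PORT B =====
def alphanumeric_alt (password : String) : Bool :=
  PySem.Str.strIsalnum password

-- ===== PRECONDITION & SPEC =====
def Spec_alphanumeric (password : String) (out : Bool) : Prop := out = alphanumeric_alt password
instance (password : String) (out : Bool) : Decidable (Spec_alphanumeric password out) := by unfold Spec_alphanumeric; infer_instance

-- ===== CLAIM (what is proved, stated in full; the proofs are below) =====
def Claim_equal_alphanumeric : Prop := ∀ (password : String), Dom_alphanumeric password → Spec_alphanumeric password (alphanumeric password)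

-- ===== LEMMAS AND PROOFS =====
theorem pvValid_contains_eq_isalnum (c : Char) : pvValid.contains c = PySem.Chars.isalnum c := by
  have h : ∀ d : Char, (c = d) ↔ (c.toNat = d.toNat) :=
    fun d => ⟨fun e => by rw [e], fun e => Char.ext (UInt32.toNat_inj.mp e)⟩
  simp only [pvValid, PySem.Chars.isalnum, PySem.Chars.isalpha, PySem.Chars.isdigit,
    PySem.Chars.isupper, PySem.Chars.islower,
    List.contains_eq_mem, List.mem_cons, List.not_mem_nil, or_false,
    Char.le_def, UInt32.le_iff_toNat_le, h, Char.toNat]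
  rw [Bool.eq_iff_iff]
  simp only [Bool.or_eq_true, Bool.and_eq_true, decide_eq_true_eq]
  simp
  omega

theorem pvAlphaLoop_eq_all (l : List Char) : pvAlphaLoop l = l.all PySem.Chars.isalnum := by
  induction l with
  | nil => rfl
  | cons c rest ih =>
      simp only [pvAlphaLoop, List.all_cons, pvValid_contains_eq_isalnum, ih]
      cases PySem.Chars.isalnum c <;> simp

-- ===== VERDICT (by name: the statement is the Claim_ definition above) =====
theorem alphanumeric_spec : Claim_equal_alphanumeric := by
  intro password _
  unfold Spec_alphanumeric alphanumeric alphanumeric_alt PySem.Str.strIsalnum PySem.Chars.strIsalnum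
  by_cases h : password = ""
  · subst h; simp
  · have ht : password.toList ≠ [] := by
      simpa [String.toList_eq_nil_iff] using h
    simp [h, pvAlphaLoop_eq_all, ht]
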